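-- pv_equiv track=rewrite | github.com/cf-x/P2P | src/hyper_llm_modulator/utils/eval_tasks.py | get_choice
-- ===== SOURCE A (Python) =====
-- def get_choice(txt: str) -> str:
--     txt = str(txt).strip().strip(":`'\"(.) ").lower()
--     CHOICES = [
--         "a",
--         "b",
--         "c",
--         "d",
--         "e",
--         "f",
--         "g",
--         "h",
--         "i",
--         "j",
--         "k",
--         "l",
--         "m",
--         "n",
--         "o",
--         "p",
--         "q",
--         "r",
--         "s",
--         "t",
--         "u",
--         "v",
--         "w",
--         "x",
--         "y",
--         "z",
--         "0",
--         "1",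
--         "2",
--         "3",
--         "4",
--         "5",
--         "6",
--         "7",
--         "8",
--         "9",
--         "10",
--     ]
--     for choice in CHOICES:
--         if txt.startswith(choice):
--             return choice
-- ===== SOURCE B (Python) =====
-- def get_choice(txt: str) -> str:
--     txt = str(txt).strip().strip(":`'\"(.) ").lower()
--     c = txt[:1]
--     return c if c in frozenset("abcdefghijklmnopqrstuvwxyz0123456789") else None
-- ===== Notes on version B (the rewrite author's own statement) =====
-- stated objective: simpler
-- what changed: Replaces the linear scan over the 37 choice prefixes with a single first-character membership test in a frozenset of valid characters (correct since every reachable choice is one character and '10' is shadowed by '1').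
import Mathlib
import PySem

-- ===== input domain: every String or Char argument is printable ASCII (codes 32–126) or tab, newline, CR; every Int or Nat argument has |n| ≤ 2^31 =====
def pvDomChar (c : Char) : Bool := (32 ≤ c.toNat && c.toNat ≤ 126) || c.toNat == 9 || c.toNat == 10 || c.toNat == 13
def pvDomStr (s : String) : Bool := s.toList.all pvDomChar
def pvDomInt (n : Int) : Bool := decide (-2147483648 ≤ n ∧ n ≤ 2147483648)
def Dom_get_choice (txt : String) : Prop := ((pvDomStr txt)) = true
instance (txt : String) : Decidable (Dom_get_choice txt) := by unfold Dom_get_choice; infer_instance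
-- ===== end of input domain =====

-- B replaces A's linear scan over the 37 choice prefixes by a single first-character membership test (simpler).

-- ===== PORT A =====
def pvChoices : List String :=
  ["a","b","c","d","e","f","g","h","i","j","k","l","m",
   "n","o","p","q","r","s","t","u","v","w","x","y","z",
   "0","1","2","3","4","5","6","7","8","9","10"]

def pvLoopA : List String → String → Option String
  | [], _ => none
  | c :: cs, t => if PySem.Str.startswith t c then some c else pvLoopA cs t

def get_choice (txt : String) : Option String :=
  let t := PySem.Str.lower (PySem.Str.stripChars (PySem.Str.strip txt) ":`'\"(.) ")
  pvLoopA pvChoices t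

-- ===== PORT B =====
def pvValid : List String :=
  "abcdefghijklmnopqrstuvwxyz0123456789".toList.map (fun ch => String.ofList [ch])

def get_choice_alt (txt : String) : Option String :=
  let t := PySem.Str.lower (PySem.Str.stripChars (PySem.Str.strip txt) ":`'\"(.) ")
  let c := String.ofList (PySem.List.slice t.toList none (some 1))
  if pvValid.contains c then some c else none

-- ===== PRECONDITION & SPEC =====
def Spec_get_choice (txt : String) (out : Option String) : Prop := out = get_choice_alt txt
instance (txt : String) (out : Option String) : Decidable (Spec_get_choice txt out) := by unfold Spec_get_choice; infer_instance

-- ===== CLAIM (what is proved, stated in full; the proofs are below) =====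
def Claim_equal_get_choice : Prop := ∀ (txt : String), Dom_get_choice txt → Spec_get_choice txt (get_choice txt)

-- ===== LEMMAS AND PROOFS =====
set_option maxRecDepth 8192
def pvCharlist : List Char :=
  ['a', 'b', 'c', 'd', 'e', 'f', 'g', 'h', 'i', 'j', 'k', 'l', 'm', 'n', 'o', 'p', 'q', 'r',
   's', 't', 'u', 'v', 'w', 'x', 'y', 'z', '0', '1', '2', '3', '4', '5', '6', '7', '8', '9']

theorem pv_beq_single (x c : Char) :
    (String.ofList [x] == String.ofList [c]) = (x == c) := by
  by_cases h : x = c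
  · subst h; simp
  · have hne : String.ofList [x] ≠ String.ofList [c] := by
      intro he
      have := congrArg String.toList he
      simp at this
      exact h this
    rw [beq_eq_false_iff_ne.mpr hne, beq_eq_false_iff_ne.mpr h]

theorem pv_contains_map_single (l : List Char) (c : Char) :
    ((l.map fun x => String.ofList [x]).contains (String.ofList [c])) = l.contains c := by
  induction l with
  | nil => rfl
  | cons x l' ih =>
    simp only [List.map_cons, List.contains_cons, pv_beq_single, ih]

theorem pv_loop_nil (L : List String) (hL : ∀ x ∈ L, x.toList ≠ []) (s : String)
    (hs : s.toList = []) : pvLoopA L s = none := by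
  induction L with
  | nil => rfl
  | cons x L' ih =>
    have hx : PySem.Chars.startswith s.toList x.toList = false := by
      cases hxl : x.toList with
      | nil => exact absurd hxl (hL x (by simp))
      | cons y ys => simp [PySem.Chars.startswith, hs, hxl]
    simp only [pvLoopA, PySem.Str.startswith_eq, hx, Bool.false_eq_true, if_false]
    exact ih (fun z hz => hL z (by simp [hz]))

theorem pv_loop_singles (l : List Char) (c : Char) (rest : List Char) (s : String)
    (hs : s.toList = c :: rest) :
    pvLoopA ((l.map fun x => String.ofList [x]) ++ ["10"]) s =
      if l.contains c then some (String.ofList [c])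
      else if PySem.Str.startswith s "10" then some "10" else none := by
  induction l with
  | nil => simp only [List.map_nil, List.nil_append, pvLoopA, List.contains_nil,
      Bool.false_eq_true, if_false]
  | cons x l' ih =>
    have hsw : PySem.Str.startswith s (String.ofList [x]) = (x == c) := by
      simp [PySem.Str.startswith, PySem.Chars.startswith, hs, List.isPrefixOf]
    simp only [List.map_cons, List.cons_append, pvLoopA, hsw, ih]
    by_cases hx : x = c
    · subst hx; simp
    · have hxc : (x == c) = false := by simp [hx]
      have hcx : ¬ c = x := fun h => hx h.symm
      simp [hxc, hcx]

theorem pv_core (s : String) :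
    pvLoopA pvChoices s =
      (if pvValid.contains (String.ofList (PySem.List.slice s.toList none (some 1)))
       then some (String.ofList (PySem.List.slice s.toList none (some 1))) else none) := by
  rcases hl : s.toList with _ | ⟨c, rest⟩
  · rw [pv_loop_nil pvChoices (by decide) s hl]
    decide
  · have hslice : PySem.List.slice (c :: rest) none (some 1) = [c] := by
      simp [PySem.List.slice]
    rw [hslice]
    have hch : pvChoices = (pvCharlist.map fun x => String.ofList [x]) ++ ["10"] := by decide
    have hmem : pvValid.contains (String.ofList [c]) = pvCharlist.contains c := by
      have hpv : pvValid = pvCharlist.map fun x => String.ofList [x] := by decide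
      rw [hpv, pv_contains_map_single]
    rw [hch, pv_loop_singles pvCharlist c rest s hl, hmem]
    by_cases h : pvCharlist.contains c = true
    · simp [show c ∈ pvCharlist from by simpa using h]
    · have hc1 : c ≠ '1' := by
        intro hc; rw [hc] at h; exact h (by decide)
      have h1 : PySem.Chars.startswith (c :: rest) ['1', '0'] = false := by
        simp [PySem.Chars.startswith, List.isPrefixOf, beq_eq_false_iff_ne.mpr (Ne.symm hc1)]
      have hm : c ∉ pvCharlist := by simpa using h
      simp [hl, h1, hm]

-- ===== VERDICT (by name: the statement is the Claim_ definition above) =====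
theorem get_choice_spec : Claim_equal_get_choice := by
  intro txt _
  unfold Spec_get_choice get_choice get_choice_alt
  exact pv_core _
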